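-- pv_equiv track=rewrite | github.com/pro-grammer-SD/EfficientManim | main.py | _parse_node_parameters
-- ===== SOURCE A (Python) =====
-- def _parse_node_parameters(params_str: str) -> dict:
--     """Parse parameters from node definition string, handling nested structures."""
--     params = {}
--
--     # Split by comma, but respect parentheses/brackets nesting
--     depth = 0
--     current_item = ""
--
--     for char in params_str:
--         if char in '([{':
--             depth += 1
--             current_item += char
--         elif char in ')]}':
--             depth -= 1
--             current_item += char
--         elif char == ',' and depth == 0:
--             # End of parameter
--             if '=' in current_item:
--                 try:
--                     key, value = current_item.split('=', 1)
--                     key = key.strip()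
--                     value = value.strip()
--                     # Store raw value (will be cleaned during merge)
--                     params[key] = value
--                 except ValueError:
--                     pass
--             current_item = ""
--         else:
--             current_item += char
--
--     # Don't forget last item
--     if current_item and '=' in current_item:
--         try:
--             key, value = current_item.split('=', 1)
--             key = key.strip()
--             value = value.strip()
--             params[key] = value
--         except ValueError:
--             pass
--
--     return params
-- ===== SOURCE B (Python) =====
-- def _parse_node_parameters(params_str: str) -> dict:
--     """Parse parameters from node definition string, handling nested structures."""
--     # Phase 1: record the positions of top-level commas (cut points).
--     depth = 0
--     cuts = [-1]
--     for i, ch in enumerate(params_str):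
--         if ch in '([{':
--             depth += 1
--         elif ch in ')]}':
--             depth -= 1
--         elif ch == ',' and depth == 0:
--             cuts.append(i)
--     cuts.append(len(params_str))
--     # Phase 2: slice out the segments between cut points and parse each.
--     segments = [params_str[a + 1:b] for a, b in zip(cuts, cuts[1:])]
--     params = {}
--     for seg in segments:
--         if '=' in seg:
--             key, value = seg.split('=', 1)
--             params[key.strip()] = value.strip()
--     return params
-- ===== Notes on version B (the rewrite author's own statement) =====
-- stated objective: alternative
-- what changed: B separates tokenization from parsing: one pass records the positions of top-level commas, the segments are then obtained by slicing between consecutive cut points and parsed in a second loop, removing A's per-character string accumulation and the duplicated last-item handling.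
import Mathlib
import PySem

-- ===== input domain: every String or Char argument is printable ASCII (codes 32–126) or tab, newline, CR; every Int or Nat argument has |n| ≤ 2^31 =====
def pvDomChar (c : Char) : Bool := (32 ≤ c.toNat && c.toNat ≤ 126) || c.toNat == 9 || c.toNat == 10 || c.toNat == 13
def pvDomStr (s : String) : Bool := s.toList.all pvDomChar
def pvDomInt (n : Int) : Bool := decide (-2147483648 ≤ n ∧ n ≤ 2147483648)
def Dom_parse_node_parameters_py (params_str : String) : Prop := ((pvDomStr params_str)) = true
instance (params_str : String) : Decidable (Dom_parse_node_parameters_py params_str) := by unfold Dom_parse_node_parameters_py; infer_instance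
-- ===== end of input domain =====

-- B separates tokenization from parsing: one pass records top-level comma positions, then the
-- segments are sliced out between consecutive cut points and parsed, instead of A's single loop
-- that accumulates the current item character by character (alternative decomposition, same cost).

-- shared parse step: "if '=' in seg: key, value = seg.split('=', 1); params[key.strip()] = value.strip()"
def pnpStore (params : PySem.Dict String String) (cur : List Char) : PySem.Dict String String :=
  if PySem.Chars.isIn ['='] cur then
    match PySem.Chars.splitOnMax cur ['='] 1 with
    | [k, v] => params.insert (String.mk (PySem.Chars.strip k)) (String.mk (PySem.Chars.strip v))
    | _ => params            -- unreachable: split('=',1) with '=' present gives exactly two parts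
  else params

-- ===== PORT A =====
def pnpStepA (st : Int × List Char × PySem.Dict String String) (c : Char) :
    Int × List Char × PySem.Dict String String :=
  if c = '(' ∨ c = '[' ∨ c = '{' then (st.1 + 1, st.2.1 ++ [c], st.2.2)
  else if c = ')' ∨ c = ']' ∨ c = '}' then (st.1 - 1, st.2.1 ++ [c], st.2.2)
  else if c = ',' ∧ st.1 = 0 then (st.1, [], pnpStore st.2.2 st.2.1)
  else (st.1, st.2.1 ++ [c], st.2.2)

-- "Don't forget last item": if current_item and '=' in current_item: …
def pnpFinish (st : Int × List Char × PySem.Dict String String) : PySem.Dict String String :=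
  if st.2.1 ≠ [] ∧ PySem.Chars.isIn ['='] st.2.1 then pnpStore st.2.2 st.2.1 else st.2.2

def parse_node_parameters_py (params_str : String) : List (String × String) :=
  (pnpFinish (params_str.toList.foldl pnpStepA (0, [], PySem.Dict.empty))).items

-- ===== PORT B =====
def pnpStepB (st : Int × List Int) (p : Int × Char) : Int × List Int :=
  if p.2 = '(' ∨ p.2 = '[' ∨ p.2 = '{' then (st.1 + 1, st.2)
  else if p.2 = ')' ∨ p.2 = ']' ∨ p.2 = '}' then (st.1 - 1, st.2)
  else if p.2 = ',' ∧ st.1 = 0 then (st.1, st.2 ++ [p.1])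
  else st

def parse_node_parameters_py_alt (params_str : String) : List (String × String) :=
  let s := params_str.toList
  let cuts := ((PySem.List.enumerate s).foldl pnpStepB (0, [-1])).2 ++ [(s.length : Int)]
  let segments := (cuts.zip cuts.tail).map (fun ab => PySem.List.slice s (some (ab.1 + 1)) (some ab.2))
  (segments.foldl pnpStore PySem.Dict.empty).items

-- ===== PRECONDITION & SPEC =====
def Spec_parse_node_parameters_py (params_str : String) (out : List (String × String)) : Prop := out = parse_node_parameters_py_alt params_str
instance (params_str : String) (out : List (String × String)) : Decidable (Spec_parse_node_parameters_py params_str out) := by unfold Spec_parse_node_parameters_py; infer_instance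

-- ===== CLAIM (what is proved, stated in full; the proofs are below) =====
def Claim_equal_parse_node_parameters_py : Prop := ∀ (params_str : String), Dom_parse_node_parameters_py params_str → Spec_parse_node_parameters_py params_str (parse_node_parameters_py params_str)

-- ===== LEMMAS AND PROOFS =====

lemma pnpStore_nil (p : PySem.Dict String String) : pnpStore p [] = p := by
  have h : PySem.Chars.isIn ['='] ([] : List Char) = false := by decide
  simp [pnpStore, h]

-- reference splitter: the list of top-level-comma-separated chunks
def pnpChunks : List Char → Int → List Char → List (List Char)
  | [], _, cur => [cur]
  | c :: rest, d, cur =>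
    if c = '(' ∨ c = '[' ∨ c = '{' then pnpChunks rest (d + 1) (cur ++ [c])
    else if c = ')' ∨ c = ']' ∨ c = '}' then pnpChunks rest (d - 1) (cur ++ [c])
    else if c = ',' ∧ d = 0 then cur :: pnpChunks rest d []
    else pnpChunks rest d (cur ++ [c])

-- A's fold, finished with A's last-item step, folds pnpStore over the chunks
lemma lemA (s : List Char) : ∀ (d : Int) (cur : List Char) (p : PySem.Dict String String),
    pnpFinish (s.foldl pnpStepA (d, cur, p)) = (pnpChunks s d cur).foldl pnpStore p := by
  induction s with
  | nil =>
    intro d cur p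
    simp only [List.foldl_nil, pnpChunks, List.foldl_cons, pnpFinish]
    split_ifs with h
    · rfl
    · rcases Decidable.not_and_iff_not_or_not.mp h with h1 | h2
      · simp at h1; subst h1; exact (pnpStore_nil p).symm
      · simp [Bool.not_eq_true] at h2 ⊢
        simp [pnpStore, h2]
  | cons c rest ih =>
    intro d cur p
    simp only [List.foldl_cons, pnpChunks]
    by_cases h1 : c = '(' ∨ c = '[' ∨ c = '{'
    · simp only [pnpStepA, h1, if_pos]; rw [ih]
    · by_cases h2 : c = ')' ∨ c = ']' ∨ c = '}'
      · simp only [pnpStepA, h1, h2, if_pos, ite_false]; rw [ih]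
      · by_cases h3 : c = ',' ∧ d = 0
        · simp only [pnpStepA, h3, ite_false, and_true, if_pos, ite_true]
          rw [ih]; simp
        · simp only [pnpStepA, h1, h2, h3, ite_false]
          rw [ih]

-- the accumulator of B's fold only appends
lemma lemBacc (l : List (Int × Char)) : ∀ (d : Int) (acc : List Int),
    l.foldl pnpStepB (d, acc)
      = ((l.foldl pnpStepB (d, [])).1, acc ++ (l.foldl pnpStepB (d, [])).2) := by
  induction l with
  | nil => intro d acc; simp
  | cons q rest ih =>
    intro d acc
    simp only [List.foldl_cons, pnpStepB]
    split_ifs with h1 h2 h3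
    · exact ih _ _
    · exact ih _ _
    · rw [ih _ ([] ++ [q.1]), ih _ (acc ++ [q.1])]; simp
    · exact ih _ _

def pnpSegs (t : List Char) : List Int → List (List Char)
  | a :: b :: rest => PySem.List.slice t (some (a + 1)) (some b) :: pnpSegs t (b :: rest)
  | _ => []

lemma pnpSegs_eq (t : List Char) (l : List Int) :
    (l.zip l.tail).map (fun ab => PySem.List.slice t (some (ab.1 + 1)) (some ab.2)) = pnpSegs t l := by
  induction l with
  | nil => simp [pnpSegs]
  | cons a rest ih =>
    cases rest with
    | nil => simp [pnpSegs]
    | cons b r => simp only [List.tail_cons, List.zip_cons_cons, List.map_cons, pnpSegs]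
                  rw [← ih]; simp [pnpSegs]

-- B's cut positions slice t into exactly the chunks
lemma lemB (t : List Char) (s : List Char) : ∀ (n a : Nat) (d : Int),
    t.drop n = s → a ≤ n → n ≤ t.length →
    pnpSegs t (((a : Int) - 1) :: ((PySem.List.enumerate s (n : Int)).foldl pnpStepB (d, [])).2 ++ [(t.length : Int)])
      = pnpChunks s d ((t.drop a).take (n - a)) := by
  induction s with
  | nil =>
    intro n a d hdrop ha hn
    have hlen : n = t.length := by
      have := List.drop_eq_nil_iff.mp hdrop; omega
    simp only [PySem.List.enumerate_nil, List.foldl_nil]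
    show pnpSegs t (((a : Int) - 1) :: [(t.length : Int)]) = [(t.drop a).take (n - a)]
    rw [show ((a : Int) - 1) :: [(t.length : Int)] = [(a : Int) - 1, (t.length : Int)] from rfl]
    simp only [pnpSegs]
    rw [show (a : Int) - 1 + 1 = (a : Int) by ring,
        PySem.List.slice_toNat t (by positivity) (by positivity)]
    simp [hlen]
  | cons c rest ih =>
    intro n a d hdrop ha hn
    have hnlt : n < t.length := by
      by_contra h
      rw [List.drop_eq_nil_of_le (by omega)] at hdrop
      simp at hdrop
    have hget : t[n]? = some c := by
      have h0 : (t.drop n)[0]? = t[n + 0]? := List.getElem?_drop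
      rw [hdrop] at h0; simpa using h0.symm
    have hrest : t.drop (n + 1) = rest := by
      have : t.drop (n+1) = (t.drop n).drop 1 := by rw [List.drop_drop]
      rw [this, hdrop]; rfl
    have hext : ∀ b : Nat, b ≤ n → (t.drop b).take (n + 1 - b) = (t.drop b).take (n - b) ++ [c] := by
      intro b hb
      rw [show n + 1 - b = (n - b) + 1 by omega, List.take_add_one]
      have : (t.drop b)[n - b]? = some c := by
        rw [List.getElem?_drop, show b + (n - b) = n by omega, hget]
      simp [this]
    rw [PySem.List.enumerate_cons]
    simp only [List.foldl_cons, pnpChunks]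
    by_cases h1 : c = '(' ∨ c = '[' ∨ c = '{'
    · simp only [pnpStepB, h1, if_pos]
      rw [show (n : Int) + 1 = ((n + 1 : Nat) : Int) by push_cast; ring]
      rw [ih (n+1) a (d+1) hrest (by omega) (by omega), hext a ha]
    · by_cases h2 : c = ')' ∨ c = ']' ∨ c = '}'
      · simp only [pnpStepB, h1, h2, ite_false, if_pos]
        rw [show (n : Int) + 1 = ((n + 1 : Nat) : Int) by push_cast; ring]
        rw [ih (n+1) a (d-1) hrest (by omega) (by omega), hext a ha]
      · by_cases h3 : c = ',' ∧ d = 0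
        · rw [if_neg h1, if_neg h2, if_pos h3]
          rw [show pnpStepB (d, ([] : List Int)) ((n : Int), c) = (d, [(n : Int)]) from by
                obtain ⟨hc, hd⟩ := h3; simp [pnpStepB, hc, hd]]
          rw [show (n : Int) + 1 = ((n + 1 : Nat) : Int) by push_cast; ring]
          rw [lemBacc]
          simp only [List.cons_append, List.nil_append]
          simp only [pnpSegs]
          rw [show (a : Int) - 1 + 1 = (a : Int) by ring,
              PySem.List.slice_toNat t (by positivity) (by positivity)]
          have hih := ih (n+1) (n+1) d hrest (by omega) (by omega)
          rw [show ((n+1 : Nat) : Int) - 1 = (n : Int) by push_cast; ring] at hih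
          simp only [Nat.sub_self, List.take_zero] at hih
          simp only [Int.toNat_natCast]
          exact congrArg₂ List.cons rfl hih
        · simp only [pnpStepB, h1, h2, h3, ite_false, if_neg]
          rw [show (n : Int) + 1 = ((n + 1 : Nat) : Int) by push_cast; ring]
          rw [ih (n+1) a d hrest (by omega) (by omega), hext a ha]

-- ===== VERDICT (by name: the statement is the Claim_ definition above) =====
theorem parse_node_parameters_py_spec : Claim_equal_parse_node_parameters_py := by
  intro ps _
  unfold Spec_parse_node_parameters_py
  have hA : parse_node_parameters_py ps
      = ((pnpChunks ps.toList 0 []).foldl pnpStore PySem.Dict.empty).items := by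
    unfold parse_node_parameters_py
    rw [lemA]
  have hB : parse_node_parameters_py_alt ps
      = ((pnpChunks ps.toList 0 []).foldl pnpStore PySem.Dict.empty).items := by
    simp only [parse_node_parameters_py_alt]
    rw [pnpSegs_eq, lemBacc]
    simp only [List.cons_append, List.nil_append]
    have hlemb := lemB ps.toList ps.toList 0 0 0 (by simp) (le_refl 0) (by simp)
    simp only [Nat.cast_zero, zero_sub, List.drop_zero, List.take_zero, Nat.sub_self] at hlemb
    exact congrArg (fun l => (List.foldl pnpStore PySem.Dict.empty l).items) hlemb
  rw [hA, hB]
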